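-- pv_equiv track=rewrite | github.com/DiTo97/gbcf-recommender-system | code/preprocessing/data_transformation.py | get_genres_hist
-- ===== SOURCE A (Python) =====
-- def get_genres_hist(all_seen_genres):
--     """Given a list of the genres of all the movies seen by a user
--             returns their histogram (counts per-genre) from the set"""
--
--     flat_genres = [i for sublist in all_seen_genres for i in sublist]
--     distinct_genres = set(flat_genres)
--
--     genres_cnts = {}
--
--     for genre in distinct_genres:
--         cnt = flat_genres.count(genre)
--         genres_cnts[genre] = cnt
--
--     return genres_cnts, len(flat_genres)
-- ===== SOURCE B (Python) =====
-- def get_genres_hist(all_seen_genres):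
--     """Single streaming pass: build the histogram dict and the total count
--     while iterating the nested lists once (no flat list, no per-genre rescans)."""
--     genres_cnts = {}
--     total = 0
--     for sublist in all_seen_genres:
--         for genre in sublist:
--             genres_cnts[genre] = genres_cnts.get(genre, 0) + 1
--             total += 1
--     return genres_cnts, total
-- ===== Notes on version B (the rewrite author's own statement) =====
-- stated objective: faster
-- what changed: Replaced A's flatten-then-count (building a flat list, taking its set, then rescanning the flat list with .count for each distinct genre) by a single streaming pass over the nested lists that increments a dict entry and a running total per element.
import Mathlib
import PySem

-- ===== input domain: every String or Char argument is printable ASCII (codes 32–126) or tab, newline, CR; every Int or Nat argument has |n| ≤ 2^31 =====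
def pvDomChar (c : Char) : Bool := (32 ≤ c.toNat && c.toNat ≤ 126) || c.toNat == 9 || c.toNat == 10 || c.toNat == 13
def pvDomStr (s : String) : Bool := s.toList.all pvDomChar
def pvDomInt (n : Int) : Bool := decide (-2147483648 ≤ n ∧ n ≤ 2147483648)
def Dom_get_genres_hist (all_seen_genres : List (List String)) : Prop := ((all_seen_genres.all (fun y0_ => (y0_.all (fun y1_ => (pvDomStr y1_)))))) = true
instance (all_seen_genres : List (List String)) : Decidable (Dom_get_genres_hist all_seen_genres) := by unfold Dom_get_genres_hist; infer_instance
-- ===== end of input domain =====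

-- B streams over the nested lists once, maintaining a dict and a running total,
-- instead of A's flatten + set + per-distinct-genre rescan (faster: O(n) vs O(n*d)).
-- NOTE: Python's set iteration order is arbitrary; both ports use first-occurrence
-- order, and dict outputs are compared ignoring order.

-- ===== PORT A =====
def get_genres_hist (all_seen_genres : List (List String)) : (List (String × Int)) × Int :=
  -- flat_genres = [i for sublist in all_seen_genres for i in sublist]
  let flat_genres := all_seen_genres.foldl (fun acc sublist => acc ++ sublist) []
  -- distinct_genres = set(flat_genres)
  let distinct_genres := PySem.Set.ofList flat_genres
  -- for genre in distinct_genres: genres_cnts[genre] = flat_genres.count(genre)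
  let genres_cnts := distinct_genres.foldl
    (fun d genre => d.insert genre ((flat_genres.count genre : Nat) : Int))
    (PySem.Dict.empty : PySem.Dict String Int)
  (genres_cnts.items, (flat_genres.length : Int))

-- ===== PORT B =====
def get_genres_hist_alt (all_seen_genres : List (List String)) : (List (String × Int)) × Int :=
  let st := all_seen_genres.foldl
    (fun st sublist =>
      sublist.foldl
        (fun st genre => (st.1.insert genre (st.1.getD genre 0 + 1), st.2 + 1)) st)
    ((PySem.Dict.empty : PySem.Dict String Int), (0 : Int))
  (st.1.items, st.2)

-- ===== PRECONDITION & SPEC =====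
def Spec_get_genres_hist (all_seen_genres : List (List String)) (out : (List (String × Int)) × Int) : Prop := out = get_genres_hist_alt all_seen_genres
instance (all_seen_genres : List (List String)) (out : (List (String × Int)) × Int) : Decidable (Spec_get_genres_hist all_seen_genres out) := by unfold Spec_get_genres_hist; infer_instance

-- ===== CLAIM (what is proved, stated in full; the proofs are below) =====
def Claim_equal_get_genres_hist : Prop := ∀ (all_seen_genres : List (List String)), Dom_get_genres_hist all_seen_genres → Spec_get_genres_hist all_seen_genres (get_genres_hist all_seen_genres)

-- ===== LEMMAS AND PROOFS =====

-- B's nested pair-fold, unfolded over a single sublist: the dict part is the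
-- insert/getD-increment fold and the total part grows by the sublist's length.
theorem pv_pairfold_sublist (l : List String) (d : PySem.Dict String Int) (n : Int) :
    l.foldl (fun st genre => (st.1.insert genre (st.1.getD genre 0 + 1), st.2 + 1)) (d, n)
      = (l.foldl (fun d x => d.insert x (d.getD x 0 + 1)) d, n + (l.length : Int)) := by
  induction l generalizing d n with
  | nil => simp
  | cons x xs ih => simp [List.foldl_cons, ih]; ring

-- B's outer fold over the nested lists equals the fold over the flattened list.
theorem pv_pairfold_flatten (ls : List (List String)) (d : PySem.Dict String Int) (n : Int) :
    ls.foldl (fun st sublist =>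
        sublist.foldl (fun st genre => (st.1.insert genre (st.1.getD genre 0 + 1), st.2 + 1)) st) (d, n)
      = (ls.flatten.foldl (fun d x => d.insert x (d.getD x 0 + 1)) d, n + (ls.flatten.length : Int)) := by
  induction ls generalizing d n with
  | nil => simp
  | cons l ls ih =>
      simp only [List.foldl_cons, List.flatten_cons, List.foldl_append, pv_pairfold_sublist, ih,
        List.length_append, Prod.mk.injEq]
      exact ⟨trivial, by push_cast; ring⟩

theorem get_genres_hist_spec_aux (ls : List (List String)) :
    get_genres_hist ls = get_genres_hist_alt ls := by
  unfold get_genres_hist get_genres_hist_alt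
  rw [PySem.List.foldl_append_eq_flatten, pv_pairfold_flatten]
  simp only [List.nil_append, Int.zero_add, Prod.mk.injEq]
  refine ⟨?_, trivial⟩
  rw [PySem.Dict.foldl_insert_getD_add_one_eq_counter, PySem.Dict.items_counter]
  have h := PySem.Dict.items_foldl_insert_fresh
      (l := PySem.Set.ofList ls.flatten) (k := fun (g : String) => g)
      (v := fun g => ((ls.flatten.count g : Nat) : Int))
      (d := (PySem.Dict.empty : PySem.Dict String Int))
      (fun a _ => PySem.Dict.contains_empty a)
      (by simpa using PySem.Set.nodup_ofList ls.flatten)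
  simp [PySem.Dict.items, PySem.Dict.empty] at h
  simpa using h

-- ===== VERDICT (by name: the statement is the Claim_ definition above) =====
theorem get_genres_hist_spec : Claim_equal_get_genres_hist := by
  intro ls _
  exact get_genres_hist_spec_aux ls
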